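-- pv_equiv track=rewrite | github.com/cesaregarza/SplatNLP | src/splatnlp/dashboard/components/pagerank_component.py | parse_compound_token
-- ===== SOURCE A (Python) =====
-- def parse_compound_token(
--     token: str, category_to_name: dict = None
-- ) -> tuple[str, str]:
--     """Parse a compound token into (category_name, ability_name).
--
--     Tokens are in format: CategoryName_ability_name_XX
--     We find the longest matching category prefix.
--     """
--     if not category_to_name:
--         # Can't parse without mapping
--         return "", token
--
--     # Try to find longest matching category prefix
--     best_match = None
--     best_length = 0
--
--     for category_name in category_to_name.values():
--         # Clean category name for matching (same as when building tokens)
--         cleaned = (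
--             category_name.replace(" ", "_")
--             .replace("-", "_")
--             .replace(".", "")
--             .replace("'", "")
--         )
--         if token.startswith(cleaned + "_"):
--             if len(cleaned) > best_length:
--                 best_match = category_name
--                 best_length = len(cleaned)
--
--     if best_match:
--         ability_part = token[best_length + 1 :]
--         return best_match, ability_part
--
--     return "", token
-- ===== SOURCE B (Python) =====
-- def _clean(name):
--     return (
--         name.replace(" ", "_")
--         .replace("-", "_")
--         .replace(".", "")
--         .replace("'", "")
--     )
--
--
-- def parse_compound_token(token, category_to_name=None):
--     if not category_to_name:
--         return "", token
--     pairs = [(_clean(name), name) for name in category_to_name.values()]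
--     pairs = [p for p in pairs if p[0]]
--     for cleaned, name in sorted(pairs, key=lambda p: len(p[0]), reverse=True):
--         if token.startswith(cleaned + "_"):
--             return name, token[len(cleaned) + 1:]
--     return "", token
-- ===== Notes on version B (the rewrite author's own statement) =====
-- stated objective: alternative
-- what changed: Replaces A's running-max scan over category values by an order-first pass: build (cleaned, name) pairs once, stably sort them by cleaned length descending, and return on the first pair whose cleaned form plus the underscore separator is a prefix of the token.
import Mathlib
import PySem

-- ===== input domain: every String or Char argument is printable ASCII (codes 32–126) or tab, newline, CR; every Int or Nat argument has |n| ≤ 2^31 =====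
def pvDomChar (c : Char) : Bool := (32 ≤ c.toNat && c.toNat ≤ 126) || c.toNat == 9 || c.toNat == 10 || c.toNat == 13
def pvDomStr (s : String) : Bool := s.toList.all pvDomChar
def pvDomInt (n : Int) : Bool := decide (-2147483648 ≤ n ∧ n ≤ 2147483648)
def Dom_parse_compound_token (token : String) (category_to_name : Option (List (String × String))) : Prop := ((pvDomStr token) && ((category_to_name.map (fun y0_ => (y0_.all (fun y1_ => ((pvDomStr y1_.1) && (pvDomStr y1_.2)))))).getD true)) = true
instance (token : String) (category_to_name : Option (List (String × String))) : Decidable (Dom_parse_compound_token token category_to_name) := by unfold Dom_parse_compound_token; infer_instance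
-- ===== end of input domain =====

-- B replaces A's running-max scan over category values by a sort-then-first-match pass
-- (stable descending sort by cleaned length, return on the first prefix match): an
-- alternative decomposition, equivalent return value on every input.

-- the cleaning of a category name (shared text of both Pythons: A inline, B's _clean)
def pvClean (name : String) : String :=
  PySem.Str.replace (PySem.Str.replace (PySem.Str.replace (PySem.Str.replace name " " "_") "-" "_") "." "") "'" ""

-- ===== PORT A =====
-- one iteration of A's 'for category_name in category_to_name.values()' loop
def pvStepA (token : String) (st : Option String × Nat) (category_name : String) : Option String × Nat :=
  let cleaned := pvClean category_name
  if PySem.Str.startswith token (cleaned ++ "_") && decide (st.2 < cleaned.toList.length)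
  then (some category_name, cleaned.toList.length) else st

def parse_compound_token (token : String) (category_to_name : Option (List (String × String))) : String × String :=
  match category_to_name with
  | none => ("", token)                      -- 'if not category_to_name'
  | some l =>
    if l = [] then ("", token)               -- empty dict is falsy too
    else
      let r := ((PySem.Dict.ofList l).values).foldl (pvStepA token) (none, 0)
      match r.1 with
      | some best_match =>                   -- 'if best_match:' (truthiness: non-empty string)
        if best_match = "" then ("", token)
        else (best_match, PySem.Str.slice token (some ((r.2 : Int) + 1)) none)
      | none => ("", token)

-- ===== PORT B =====
-- B's 'for cleaned, name in sorted(pairs, ...): if token.startswith(...): return ...' loop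
def pvFirstMatch (token : String) : List (String × String) → String × String
  | [] => ("", token)
  | (cleaned, name) :: rest =>
    if PySem.Str.startswith token (cleaned ++ "_")
    then (name, PySem.Str.slice token (some ((cleaned.toList.length : Int) + 1)) none)
    else pvFirstMatch token rest

def parse_compound_token_alt (token : String) (category_to_name : Option (List (String × String))) : String × String :=
  match category_to_name with
  | none => ("", token)
  | some l =>
    if l = [] then ("", token)
    else
      let pairs := ((PySem.Dict.ofList l).values).map (fun name => (pvClean name, name))
      let pairs := pairs.filter (fun p => !(p.1 == ""))
      pvFirstMatch token (PySem.List.sorted pairs (fun p => p.1.toList.length) true)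

-- ===== PRECONDITION & SPEC =====
def Spec_parse_compound_token (token : String) (category_to_name : Option (List (String × String))) (out : String × String) : Prop := out = parse_compound_token_alt token category_to_name
instance (token : String) (category_to_name : Option (List (String × String))) (out : String × String) : Decidable (Spec_parse_compound_token token category_to_name out) := by unfold Spec_parse_compound_token; infer_instance

-- ===== CLAIM (what is proved, stated in full; the proofs are below) =====
def Claim_equal_parse_compound_token : Prop := ∀ (token : String) (category_to_name : Option (List (String × String))), Dom_parse_compound_token token category_to_name → Spec_parse_compound_token token category_to_name (parse_compound_token token category_to_name)

-- ===== LEMMAS AND PROOFS =====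

-- A's loop step on precomputed (cleaned, name) pairs, with the match test p and the
-- length key abstract (keeps simp from rewriting under them)
def pvStepGen (p : String × String → Bool) (key : String × String → Nat)
    (st : Option String × Nat) (e : String × String) : Option String × Nat :=
  if p e && decide (st.2 < key e) then (some e.2, key e) else st

-- pairs with key 0 (empty cleaned part) are no-ops for A's loop, whatever the state
lemma foldl_stepGen_filter (p : String × String → Bool) (key : String × String → Nat)
    (ps : List (String × String)) (st : Option String × Nat) :
    ps.foldl (pvStepGen p key) st =
      (ps.filter (fun e => !(key e == 0))).foldl (pvStepGen p key) st := by
  induction ps generalizing st with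
  | nil => rfl
  | cons e t ih =>
    by_cases h : key e = 0
    · have hstep : pvStepGen p key st e = st := by
        have : decide (st.2 < key e) = false := by simp [h]
        simp [pvStepGen, this]
      have hcond : (!(key e == 0)) = false := by simp [h]
      rw [List.foldl_cons, hstep, List.filter_cons, hcond]
      simp only [Bool.false_eq_true, if_false]
      exact ih st
    · have hcond : (!(key e == 0)) = true := by simp [h]
      rw [List.foldl_cons, List.filter_cons, hcond]
      simp only [if_true]
      rw [List.foldl_cons]
      exact ih (pvStepGen p key st e)

-- find? over an insertion into a descending-sorted list
lemma find?_insertBy (p : String × String → Bool) (key : String × String → Nat)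
    (e : String × String) (l : List (String × String))
    (hl : l.Pairwise (fun a b => key b ≤ key a)) :
    (PySem.List.insertBy (fun a b => decide (key b < key a)) e l).find? p =
      match l.find? p with
      | none => if p e then some e else none
      | some m => if p e && decide (key m < key e) then some e else some m := by
  induction l with
  | nil =>
    simp only [PySem.List.insertBy, List.find?]
    cases hpe : p e <;> simp
  | cons y ys ih =>
    have hy : ∀ z ∈ ys, key z ≤ key y := (List.pairwise_cons.mp hl).1
    have hys : ys.Pairwise (fun a b => key b ≤ key a) := (List.pairwise_cons.mp hl).2
    by_cases hb : key y < key e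
    · -- e is inserted in front of y
      have hb' : decide (key y < key e) = true := by simpa using hb
      simp only [PySem.List.insertBy, hb', if_true]
      cases hfy : (y :: ys).find? p with
      | none =>
        cases hpe : p e
        · rw [List.find?_cons_of_neg (by simp [hpe]), hfy]
          simp
        · rw [List.find?_cons_of_pos hpe]
          simp
      | some m =>
        have hm : m ∈ y :: ys := List.mem_of_find?_eq_some hfy
        have hkm : key m ≤ key y := by
          rcases List.mem_cons.mp hm with h | h
          · exact h ▸ le_refl _
          · exact hy m h
        have hlt : decide (key m < key e) = true := by
          simpa using lt_of_le_of_lt hkm hb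
        cases hpe : p e
        · rw [List.find?_cons_of_neg (by simp [hpe]), hfy]
          simp
        · rw [List.find?_cons_of_pos hpe]
          simp [hlt]
    · -- e goes further right
      have hb' : decide (key y < key e) = false := by simpa using hb
      simp only [PySem.List.insertBy, hb', Bool.false_eq_true, if_false]
      cases hpy : p y
      · -- head is not a match on either side
        rw [List.find?_cons_of_neg (by simp [hpy]),
          List.find?_cons_of_neg (by simp [hpy])]
        exact ih hys
      · -- head matches: it stays the first match, and e cannot beat it
        rw [List.find?_cons_of_pos hpy, List.find?_cons_of_pos hpy]
        simp [hb']
-- the central correspondence: A's running-max fold = first match of B's descending sort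
lemma fold_eq_find (p : String × String → Bool) (key : String × String → Nat)
    (ps : List (String × String)) (h : ∀ e ∈ ps, key e ≠ 0) :
    ps.foldl (pvStepGen p key) (none, 0) =
      match (PySem.List.sorted ps key true).find? p with
      | none => (none, 0)
      | some m => (some m.2, key m) := by
  induction ps using List.reverseRecOn with
  | nil => simp [PySem.List.sorted_rev_eq_foldl_insertBy]
  | append_singleton ps e ih =>
    have hps : ∀ x ∈ ps, key x ≠ 0 := fun x hx => h x (List.mem_append_left _ hx)
    have he : key e ≠ 0 := h e (List.mem_append_right _ (List.mem_singleton.mpr rfl))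
    have hsort : PySem.List.sorted (ps ++ [e]) key true =
        PySem.List.insertBy (fun a b => decide (key b < key a)) e
          (PySem.List.sorted ps key true) := by
      rw [PySem.List.sorted_rev_eq_foldl_insertBy, PySem.List.sorted_rev_eq_foldl_insertBy,
        List.foldl_append]
      rfl
    rw [List.foldl_append, ih hps, hsort,
      find?_insertBy p key e _ (PySem.List.sorted_pairwise_rev ps key)]
    cases hf : (PySem.List.sorted ps key true).find? p with
    | none =>
      simp only [List.foldl_cons, List.foldl_nil, pvStepGen]
      cases hpe : p e
      · simp
      · have : decide ((0 : Nat) < key e) = true := by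
          simpa using Nat.pos_of_ne_zero he
        simp [this]
    | some m =>
      simp only [List.foldl_cons, List.foldl_nil, pvStepGen]
      cases hpe : p e
      · simp
      · by_cases hlt : key m < key e
        · have h1 : decide (key m < key e) = true := by simpa using hlt
          simp [h1]
        · have h1 : decide (key m < key e) = false := by simpa using hlt
          simp [h1]

-- B's loop characterised by find?
lemma firstMatch_eq_find (token : String) (l : List (String × String)) :
    pvFirstMatch token l =
      match l.find? (fun e => PySem.Str.startswith token (e.1 ++ "_")) with
      | none => ("", token)
      | some m => (m.2, PySem.Str.slice token (some ((m.1.toList.length : Int) + 1)) none) := by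
  induction l with
  | nil => rfl
  | cons e t ih =>
    obtain ⟨c, n⟩ := e
    cases hpe : PySem.Str.startswith token (c ++ "_")
    · rw [List.find?_cons_of_neg (by simpa using hpe)]
      simpa only [pvFirstMatch, hpe, Bool.false_eq_true, if_false] using ih
    · rw [List.find?_cons_of_pos (by simpa using hpe)]
      simp only [pvFirstMatch, hpe, if_true]

lemma pvClean_empty : pvClean "" = "" := by decide

-- ===== VERDICT (by name: the statement is the Claim_ definition above) =====
theorem parse_compound_token_spec : Claim_equal_parse_compound_token := by
  intro token category_to_name _
  unfold Spec_parse_compound_token parse_compound_token parse_compound_token_alt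
  cases category_to_name with
  | none => rfl
  | some l =>
    by_cases hl : l = []
    · simp [hl]
    · simp only [hl, if_false]
      set p : String × String → Bool := fun e => PySem.Str.startswith token (e.1 ++ "_") with hp
      set key : String × String → Nat := fun e => e.1.toList.length with hkey
      set vals := (PySem.Dict.ofList l).values with hvals
      set ps := vals.map (fun name => (pvClean name, name)) with hps
      have hfilter : ps.filter (fun e => !(e.1 == "")) = ps.filter (fun e => !(key e == 0)) := by
        apply List.filter_congr
        intro e _
        by_cases hc : e.1 = ""
        · simp [hc, hkey]
        · have : e.1.toList ≠ [] := fun hn => hc (String.toList_eq_nil_iff.mp hn)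
          simp [hc, hkey]
      set ps' := ps.filter (fun e => !(e.1 == "")) with hps'
      have hfold : vals.foldl (pvStepA token) (none, 0) = ps'.foldl (pvStepGen p key) (none, 0) := by
        rw [hfilter, ← foldl_stepGen_filter, hps, List.foldl_map]
        rfl
      have hpos : ∀ e ∈ ps', key e ≠ 0 := by
        intro e hep
        have hne : e.1 ≠ "" := by simpa using List.of_mem_filter hep
        have : e.1.toList ≠ [] := fun hn => hne (String.toList_eq_nil_iff.mp hn)
        simpa [hkey, List.length_eq_zero_iff] using this
      rw [hfold, fold_eq_find p key ps' hpos, firstMatch_eq_find]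
      cases hf : (PySem.List.sorted ps' key true).find? p with
      | none => rfl
      | some m =>
        have hm : m ∈ ps' := by
          have hms : m ∈ PySem.List.sorted ps' key true := List.mem_of_find?_eq_some hf
          exact (PySem.List.mem_sorted _ _ _ _).mp hms
        have hmc : m.1 = pvClean m.2 := by
          have : m ∈ ps := List.mem_of_mem_filter hm
          obtain ⟨n, _, hn⟩ := List.mem_map.mp this
          rw [← hn]
        have hm2 : ¬ (m.2 = "") := by
          intro h2
          have hm1 : m.1 ≠ "" := by simpa using List.of_mem_filter hm
          exact hm1 (by rw [hmc, h2, pvClean_empty])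
        simp only [hkey, if_neg hm2]
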